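-- pv_equiv track=rewrite | github.com/siddmax/Namera | src/namera/scoring/local_signals.py | _build_phonetic_pattern
-- ===== SOURCE A (Python) =====
-- _VOWELS = set("aeiou")
--
-- _CONSONANTS = set("bcdfghjklmnpqrstvwxyz")
--
-- _DIGRAPHS = {"sh", "ch", "th", "ph", "wh", "ck", "ng", "qu", "gh"}
--
-- def _is_contextual_vowel_y(name: str, pos: int) -> bool:
--     """Return True when 'y' at *pos* acts as a vowel.
--
--     y is a vowel when: not word-initial AND preceded by a consonant.
--     Examples: lyft (y=vowel), rhythm (y=vowel), yes (y=consonant), yak (y=consonant).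
--     """
--     if pos == 0:
--         return False
--     prev = name[pos - 1].lower()
--     return prev in _CONSONANTS
--
-- def _build_phonetic_pattern(name: str) -> str:
--     """Build a CV pattern that handles contextual y and digraphs."""
--     lower = name.lower()
--     pattern = []
--     i = 0
--     while i < len(lower):
--         ch = lower[i]
--
--         # Check for digraphs (two chars → single consonant unit)
--         if i + 1 < len(lower) and lower[i : i + 2] in _DIGRAPHS:
--             pattern.append("C")
--             i += 2
--             continue
--
--         if ch == "y":
--             if _is_contextual_vowel_y(lower, i):
--                 pattern.append("V")
--             else:
--                 pattern.append("C")
--         elif ch in _VOWELS: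
--             pattern.append("V")
--         elif ch in _CONSONANTS:
--             pattern.append("C")
--         # Skip non-alpha characters
--         i += 1
--
--     return "".join(pattern)
-- ===== SOURCE B (Python) =====
-- _VOWELS = set("aeiou")
-- _CONSONANTS = set("bcdfghjklmnpqrstvwxyz")
-- _DIGRAPHS = {"sh", "ch", "th", "ph", "wh", "ck", "ng", "qu", "gh"}
--
-- def _tokenize(lower):
--     """Segment into tokens: (is_digraph, first_char, preceding_char_or_None)."""
--     tokens = []
--     i = 0
--     n = len(lower)
--     while i < n:
--         if lower[i:i + 2] in _DIGRAPHS: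
--             tokens.append((True, lower[i], None))
--             i += 2
--         else:
--             tokens.append((False, lower[i], lower[i - 1] if i > 0 else None))
--             i += 1
--     return tokens
--
-- def _classify(token):
--     """Map one token to its pattern symbol ('' for non-alpha)."""
--     is_digraph, ch, prev = token
--     if is_digraph:
--         return "C"
--     if ch == "y":
--         return "V" if (prev is not None and prev in _CONSONANTS) else "C"
--     if ch in _VOWELS:
--         return "V"
--     if ch in _CONSONANTS:
--         return "C"
--     return ""
--
-- def _build_phonetic_pattern(name: str) -> str:
--     return "".join(map(_classify, _tokenize(name.lower())))
-- ===== Notes on version B (the rewrite author's own statement) =====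
-- stated objective: alternative
-- what changed: B splits A's single fused index-walking loop into two passes: a greedy tokenizer that segments the lowered name into digraph/single-char tokens recording each token's preceding character, followed by a per-token classification pass joined at the end.
import Mathlib
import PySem

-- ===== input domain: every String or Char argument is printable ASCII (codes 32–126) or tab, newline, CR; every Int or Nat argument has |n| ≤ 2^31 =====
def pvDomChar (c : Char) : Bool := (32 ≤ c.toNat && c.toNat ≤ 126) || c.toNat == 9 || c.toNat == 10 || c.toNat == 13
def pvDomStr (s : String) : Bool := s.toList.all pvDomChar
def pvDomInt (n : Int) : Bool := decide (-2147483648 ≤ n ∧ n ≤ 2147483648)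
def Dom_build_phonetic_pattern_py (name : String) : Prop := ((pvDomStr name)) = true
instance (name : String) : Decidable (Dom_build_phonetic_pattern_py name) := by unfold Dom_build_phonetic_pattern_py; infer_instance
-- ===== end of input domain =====

-- B separates segmentation (digraph tokenisation) from classification into two passes,
-- instead of A's single fused index-walking loop; objective: alternative decomposition, not speed.

-- ===== PORT A =====
def pvIsVowel (c : Char) : Bool := c ∈ ['a','e','i','o','u']
def pvIsCons (c : Char) : Bool :=
  c ∈ ['b','c','d','f','g','h','j','k','l','m','n','p','q','r','s','t','v','w','x','y','z']
def pvIsDigraph (a b : Char) : Bool :=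
  (a, b) ∈ [('s','h'),('c','h'),('t','h'),('p','h'),('w','h'),('c','k'),('n','g'),('q','u'),('g','h')]

-- port of _is_contextual_vowel_y: pos = 0 ↔ prev = none; else prev char in consonants
def pvYVowel (prev : Option Char) : Bool :=
  match prev with
  | none => false
  | some p => pvIsCons p

-- A's while-loop: state (remaining chars, previous char of `lower`, pattern so far);
-- branches in A's order (digraph, 'y', vowel, consonant, skip).
def pvLoopA : List Char → Option Char → List Char → List Char
  | [], _, pattern => pattern
  | [a], prev, pattern =>
      if a = 'y' then
        (if pvYVowel prev then pattern ++ ['V'] else pattern ++ ['C'])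
      else if pvIsVowel a then pattern ++ ['V']
      else if pvIsCons a then pattern ++ ['C']
      else pattern
  | a :: b :: rest, prev, pattern =>
      if pvIsDigraph a b then pvLoopA rest (some b) (pattern ++ ['C'])
      else if a = 'y' then
        (if pvYVowel prev then pvLoopA (b :: rest) (some a) (pattern ++ ['V'])
         else pvLoopA (b :: rest) (some a) (pattern ++ ['C']))
      else if pvIsVowel a then pvLoopA (b :: rest) (some a) (pattern ++ ['V'])
      else if pvIsCons a then pvLoopA (b :: rest) (some a) (pattern ++ ['C'])
      else pvLoopA (b :: rest) (some a) pattern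
  termination_by l => l.length

def build_phonetic_pattern_py (name : String) : String :=
  String.mk (pvLoopA (PySem.Str.lower name).toList none [])

-- ===== PORT B =====
-- pass 1: greedy segmentation into tokens (is_digraph, first char, preceding char or none)
def pvTokenize : List Char → Option Char → List (Bool × Char × Option Char)
  | [], _ => []
  | [a], prev => [(false, a, prev)]
  | a :: b :: rest, prev =>
      if pvIsDigraph a b then (true, a, none) :: pvTokenize rest (some b)
      else (false, a, prev) :: pvTokenize (b :: rest) (some a)
  termination_by l => l.length

-- pass 2: classify one token to its symbol ('' for non-alpha)
def pvClassify : Bool × Char × Option Char → List Char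
  | (true, _, _) => ['C']
  | (false, ch, prev) =>
      if ch = 'y' then (if pvYVowel prev then ['V'] else ['C'])
      else if pvIsVowel ch then ['V']
      else if pvIsCons ch then ['C']
      else []

def build_phonetic_pattern_py_alt (name : String) : String :=
  String.mk ((pvTokenize (PySem.Str.lower name).toList none).flatMap pvClassify)

-- ===== PRECONDITION & SPEC =====
def Spec_build_phonetic_pattern_py (name : String) (out : String) : Prop := out = build_phonetic_pattern_py_alt name
instance (name : String) (out : String) : Decidable (Spec_build_phonetic_pattern_py name out) := by unfold Spec_build_phonetic_pattern_py; infer_instance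

-- ===== CLAIM (what is proved, stated in full; the proofs are below) =====
def Claim_equal_build_phonetic_pattern_py : Prop := ∀ (name : String), Dom_build_phonetic_pattern_py name → Spec_build_phonetic_pattern_py name (build_phonetic_pattern_py name)

-- ===== LEMMAS AND PROOFS =====

theorem pvLoopA_eq_tokens (l : List Char) (prev : Option Char) (pattern : List Char) :
    pvLoopA l prev pattern = pattern ++ (pvTokenize l prev).flatMap pvClassify := by
  induction l, prev, pattern using pvLoopA.induct with
  | _ => simp_all [pvLoopA, pvTokenize, pvClassify]

theorem build_phonetic_pattern_py_spec : Claim_equal_build_phonetic_pattern_py := by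
  intro name _
  show _ = _
  simp [build_phonetic_pattern_py, build_phonetic_pattern_py_alt, pvLoopA_eq_tokens]
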